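-- pv_equiv track=rewrite | github.com/lardexxx/scanner_hybrid | scanners/xss_contexts.py | _determine_js_context
-- ===== SOURCE A (Python) =====
-- def _determine_js_context(js: str, pos: int) -> str:
--     state = "raw"
--     escaped = False
--     i = 0
--
--     while i < min(pos, len(js)):
--         ch = js[i]
--         nxt = js[i + 1] if i + 1 < len(js) else ""
--
--         if state in {"sq", "dq", "template"}:
--             if escaped:
--                 escaped = False
--                 i += 1
--                 continue
--             if ch == "\\":
--                 escaped = True
--                 i += 1
--                 continue
--             if state == "sq" and ch == "'":
--                 state = "raw"
--             elif state == "dq" and ch == "\"":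
--                 state = "raw"
--             elif state == "template" and ch == "`":
--                 state = "raw"
--             i += 1
--             continue
--
--         if ch == "'":
--             state = "sq"
--             i += 1
--             continue
--         if ch == "\"":
--             state = "dq"
--             i += 1
--             continue
--         if ch == "`":
--             state = "template"
--             i += 1
--             continue
--
--         # Skip comments compactly without storing separate contexts.
--         if ch == "/" and nxt == "/":
--             line_end = js.find("\n", i + 2)
--             i = len(js) if line_end == -1 else line_end + 1
--             continue
--         if ch == "/" and nxt == "*":
--             block_end = js.find("*/", i + 2)
--             i = len(js) if block_end == -1 else block_end + 2
--             continue
--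
--         i += 1
--
--     if state == "sq":
--         return "js_string_sq"
--     if state == "dq":
--         return "js_string_dq"
--     if state == "template":
--         return "js_template"
--     return "js_raw"
-- ===== SOURCE B (Python) =====
-- def _determine_js_context(js: str, pos: int) -> str:
--     # Full state machine: comments are explicit states walked one char at a time
--     # instead of str.find jumps; comment states collapse to "js_raw" at the end.
--     limit = min(pos, len(js))
--     state = "raw"
--     escaped = False
--     i = 0
--     while i < limit:
--         ch = js[i]
--         if state == "sq" or state == "dq" or state == "template":
--             if escaped:
--                 escaped = False
--             elif ch == "\\":
--                 escaped = True
--             elif (state == "sq" and ch == "'") or \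
--                  (state == "dq" and ch == '"') or \
--                  (state == "template" and ch == "`"):
--                 state = "raw"
--             i += 1
--         elif state == "raw":
--             if ch == "'":
--                 state = "sq"
--             elif ch == '"':
--                 state = "dq"
--             elif ch == "`":
--                 state = "template"
--             elif ch == "/" and i + 1 < len(js) and js[i + 1] == "/":
--                 state = "line_comment"
--                 i += 1
--             elif ch == "/" and i + 1 < len(js) and js[i + 1] == "*":
--                 state = "block_comment"
--                 i += 1
--             i += 1
--         elif state == "line_comment":
--             if ch == "\n":
--                 state = "raw"
--             i += 1
--         else:  # block_comment
--             if ch == "*" and i + 1 < len(js) and js[i + 1] == "/":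
--                 state = "raw"
--                 i += 1
--             i += 1
--     return {"sq": "js_string_sq", "dq": "js_string_dq",
--             "template": "js_template"}.get(state, "js_raw")
-- ===== Notes on version B (the rewrite author's own statement) =====
-- stated objective: simpler
-- what changed: A jumps over comments with str.find-based index jumps inside its scanner loop; B is a uniform character-by-character state machine with explicit line_comment/block_comment states (no str.find), both comment states collapsing to js_raw at the end.
import Mathlib
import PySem

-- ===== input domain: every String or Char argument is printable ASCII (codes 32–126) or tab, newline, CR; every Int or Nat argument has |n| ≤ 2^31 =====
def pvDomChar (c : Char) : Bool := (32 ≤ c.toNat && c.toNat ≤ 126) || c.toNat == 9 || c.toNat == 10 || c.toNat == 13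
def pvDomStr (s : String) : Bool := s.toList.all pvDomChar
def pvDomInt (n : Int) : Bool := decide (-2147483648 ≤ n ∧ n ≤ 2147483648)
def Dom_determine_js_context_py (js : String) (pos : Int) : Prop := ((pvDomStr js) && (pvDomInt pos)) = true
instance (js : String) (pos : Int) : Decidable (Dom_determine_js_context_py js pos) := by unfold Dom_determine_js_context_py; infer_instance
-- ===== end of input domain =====

-- B replaces A's str.find comment jumps by explicit line/block-comment states of
-- one uniform character-by-character state machine (objective: simpler).

-- ===== PORT A =====
-- js.find(sub, start) result is ≥ start when it is not -1 (used only for termination of the port's while loop)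
theorem pvFindFrom_ge (cs sub : List Char) (i : Nat) (h2 : i + 2 ≤ cs.length)
    (hne : PySem.Chars.findFrom cs sub ((i : Int) + 2) none ≠ -1) :
    (i : Int) + 2 ≤ PySem.Chars.findFrom cs sub ((i : Int) + 2) none := by
  have hcast : ((i : Int) + 2) = ((i + 2 : Nat) : Int) := by push_cast; ring
  rw [hcast] at hne ⊢
  rw [PySem.Chars.findFrom_natCast cs sub (i + 2) h2] at hne ⊢
  have hge := PySem.Chars.neg_one_le_find (cs.drop (i + 2)) sub
  split at hne
  · simp at hne
  · split
    · omega
    · rename_i h _; omega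

-- final mapping of A (the chain of ifs at the bottom of _determine_js_context)
def pvFinalA (state : String) : String :=
  if state = "sq" then "js_string_sq"
  else if state = "dq" then "js_string_dq"
  else if state = "template" then "js_template"
  else "js_raw"

-- the while loop of A; i jumps over comments using js.find
def pvALoop (cs : List Char) (limit : Nat) (state : String) (escaped : Bool) (i : Nat) : String :=
  if hi : i < limit then
    let ch := cs.getD i ' '
    let nxt : Option Char := cs[i + 1]?
    if state = "sq" ∨ state = "dq" ∨ state = "template" then
      if escaped then pvALoop cs limit state false (i + 1)
      else if ch = '\\' then pvALoop cs limit state true (i + 1)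
      else
        let state' := if state = "sq" ∧ ch = '\'' then "raw"
          else if state = "dq" ∧ ch = '"' then "raw"
          else if state = "template" ∧ ch = '`' then "raw"
          else state
        pvALoop cs limit state' escaped (i + 1)
    else if ch = '\'' then pvALoop cs limit "sq" escaped (i + 1)
    else if ch = '"' then pvALoop cs limit "dq" escaped (i + 1)
    else if ch = '`' then pvALoop cs limit "template" escaped (i + 1)
    else if hll : ch = '/' ∧ nxt = some '/' then
      let line_end := PySem.Chars.findFrom cs ['\n'] ((i : Int) + 2) none
      pvALoop cs limit state escaped (if line_end = -1 then cs.length else (line_end + 1).toNat)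
    else if hbb : ch = '/' ∧ nxt = some '*' then
      let block_end := PySem.Chars.findFrom cs ['*', '/'] ((i : Int) + 2) none
      pvALoop cs limit state escaped (if block_end = -1 then cs.length else (block_end + 2).toNat)
    else pvALoop cs limit state escaped (i + 1)
  else pvFinalA state
termination_by limit - i
decreasing_by
  · omega
  · omega
  · omega
  · omega
  · omega
  · omega
  · -- line-comment jump
    have hlt : i + 1 < cs.length := by
      have h2 : cs[i + 1]? = some '/' := hll.2
      exact (List.getElem?_eq_some_iff.mp h2).1
    split
    · omega
    · rename_i hne
      have := pvFindFrom_ge cs ['\n'] i (by omega) hne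
      omega
  · -- block-comment jump
    have hlt : i + 1 < cs.length := by
      have h2 : cs[i + 1]? = some '*' := hbb.2
      exact (List.getElem?_eq_some_iff.mp h2).1
    split
    · omega
    · rename_i hne
      have := pvFindFrom_ge cs ['*', '/'] i (by omega) hne
      omega
  · omega

def determine_js_context_py (js : String) (pos : Int) : String :=
  pvALoop js.toList (min pos (js.toList.length : Int)).toNat "raw" false 0

-- ===== PORT B =====
-- the while loop of B: a pure state machine with explicit comment states
def pvBLoop (cs : List Char) (limit : Nat) (state : String) (escaped : Bool) (i : Nat) : String :=
  if i < limit then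
    let ch := cs.getD i ' '
    if state = "sq" ∨ state = "dq" ∨ state = "template" then
      if escaped then pvBLoop cs limit state false (i + 1)
      else if ch = '\\' then pvBLoop cs limit state true (i + 1)
      else if (state = "sq" ∧ ch = '\'') ∨ (state = "dq" ∧ ch = '"') ∨
              (state = "template" ∧ ch = '`') then
        pvBLoop cs limit "raw" escaped (i + 1)
      else pvBLoop cs limit state escaped (i + 1)
    else if state = "raw" then
      if ch = '\'' then pvBLoop cs limit "sq" escaped (i + 1)
      else if ch = '"' then pvBLoop cs limit "dq" escaped (i + 1)
      else if ch = '`' then pvBLoop cs limit "template" escaped (i + 1)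
      else if ch = '/' ∧ i + 1 < cs.length ∧ cs.getD (i + 1) ' ' = '/' then
        pvBLoop cs limit "line_comment" escaped (i + 2)
      else if ch = '/' ∧ i + 1 < cs.length ∧ cs.getD (i + 1) ' ' = '*' then
        pvBLoop cs limit "block_comment" escaped (i + 2)
      else pvBLoop cs limit state escaped (i + 1)
    else if state = "line_comment" then
      if ch = '\n' then pvBLoop cs limit "raw" escaped (i + 1)
      else pvBLoop cs limit state escaped (i + 1)
    else
      if ch = '*' ∧ i + 1 < cs.length ∧ cs.getD (i + 1) ' ' = '/' then
        pvBLoop cs limit "raw" escaped (i + 2)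
      else pvBLoop cs limit state escaped (i + 1)
  else
    PySem.Dict.getD
      (PySem.Dict.ofList [("sq", "js_string_sq"), ("dq", "js_string_dq"), ("template", "js_template")])
      state "js_raw"
termination_by limit - i

def determine_js_context_py_alt (js : String) (pos : Int) : String :=
  pvBLoop js.toList (min pos (js.toList.length : Int)).toNat "raw" false 0

-- ===== PRECONDITION & SPEC =====
def Spec_determine_js_context_py (js : String) (pos : Int) (out : String) : Prop := out = determine_js_context_py_alt js pos
instance (js : String) (pos : Int) (out : String) : Decidable (Spec_determine_js_context_py js pos out) := by unfold Spec_determine_js_context_py; infer_instance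

-- ===== CLAIM (what is proved, stated in full; the proofs are below) =====
def Claim_equal_determine_js_context_py : Prop := ∀ (js : String) (pos : Int), Dom_determine_js_context_py js pos → Spec_determine_js_context_py js pos (determine_js_context_py js pos)

-- ===== LEMMAS AND PROOFS =====
theorem pv_singleton_prefix (c : Char) (l : List Char) : [c] <+: l ↔ l.head? = some c := by
  constructor
  · rintro ⟨r, rfl⟩; rfl
  · intro h; cases l with
    | nil => simp at h
    | cons a t => simp at h; exact ⟨t, by simp [h]⟩

theorem pv_pair_prefix (c d : Char) (l : List Char) :
    [c, d] <+: l ↔ l.head? = some c ∧ l.tail.head? = some d := by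
  constructor
  · rintro ⟨r, rfl⟩; exact ⟨rfl, rfl⟩
  · rintro ⟨h1, h2⟩
    cases l with
    | nil => simp at h1
    | cons a t => cases t with
      | nil => simp at h2
      | cons b u => simp at h1 h2; exact ⟨u, by simp [h1, h2]⟩

def pvPairStar (cs : List Char) (m : Nat) : Prop :=
  m + 1 < cs.length ∧ cs.getD m ' ' = '*' ∧ cs.getD (m + 1) ' ' = '/'
theorem pv_find_nl_neg (cs : List Char) (i : Nat) (h2 : i + 2 ≤ cs.length)
    (h : PySem.Chars.findFrom cs ['\n'] ((i : Int) + 2) none = -1) :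
    ∀ m, i + 2 ≤ m → cs.getD m ' ' ≠ '\n' := by
  have hcast : ((i : Int) + 2) = ((i + 2 : Nat) : Int) := by push_cast; ring
  rw [hcast, PySem.Chars.findFrom_natCast_eq_neg_one_iff cs ['\n'] (i + 2) h2] at h
  intro m hm hc
  apply h
  have hml : m < cs.length := by
    by_contra hge
    rw [List.getD_eq_getElem?_getD, List.getElem?_eq_none (by omega : cs.length ≤ m)] at hc
    simp at hc
  have : '\n' ∈ cs.drop (i + 2) := by
    rw [List.mem_iff_getElem?]
    exact ⟨m - (i + 2), by rw [List.getElem?_drop]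
                           rw [List.getD_eq_getElem?_getD] at hc
                           have := List.getElem?_eq_getElem hml
                           rw [show i + 2 + (m - (i + 2)) = m from by omega, this]
                           simp_all [List.getD]⟩
  exact (List.singleton_infix_iff '\n' _).mpr this

theorem pv_find_nl_pos (cs : List Char) (i : Nat) (h2 : i + 2 ≤ cs.length)
    (hne : PySem.Chars.findFrom cs ['\n'] ((i : Int) + 2) none ≠ -1) :
    i + 2 ≤ (PySem.Chars.findFrom cs ['\n'] ((i : Int) + 2) none).toNat ∧
    (PySem.Chars.findFrom cs ['\n'] ((i : Int) + 2) none).toNat < cs.length ∧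
    cs.getD (PySem.Chars.findFrom cs ['\n'] ((i : Int) + 2) none).toNat ' ' = '\n' ∧
    ∀ j, i + 2 ≤ j → j < (PySem.Chars.findFrom cs ['\n'] ((i : Int) + 2) none).toNat →
      cs.getD j ' ' ≠ '\n' := by
  have hcast : ((i : Int) + 2) = ((i + 2 : Nat) : Int) := by push_cast; ring
  rw [hcast] at hne ⊢
  rw [PySem.Chars.findFrom_natCast cs ['\n'] (i + 2) h2] at hne ⊢
  set f := PySem.Chars.find (cs.drop (i + 2)) ['\n'] with hf
  have hfne : f ≠ -1 := by intro hc; rw [hc] at hne; simp at hne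
  have hf0 : 0 ≤ f := by have := PySem.Chars.neg_one_le_find (cs.drop (i + 2)) ['\n']; omega
  rw [if_neg hfne]
  have hspec := PySem.Chars.find_spec hf0
  obtain ⟨hpre, hmin⟩ := hspec
  rw [pv_singleton_prefix, List.drop_drop, List.head?_drop, ← hf] at hpre
  have htn : (((i + 2 : Nat) : Int) + f).toNat = i + 2 + f.toNat := by omega
  rw [htn]
  have hlen : i + 2 + f.toNat < cs.length := (List.getElem?_eq_some_iff.mp hpre).1
  refine ⟨by omega, hlen, ?_, ?_⟩
  · rw [List.getD_eq_getElem?_getD, hpre]; rfl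
  · intro j hj hjlt hc
    have hjl : j < cs.length := by omega
    apply hmin (j - (i + 2)) (by omega)
    rw [pv_singleton_prefix, List.drop_drop, List.head?_drop,
        show i + 2 + (j - (i + 2)) = j from by omega]
    rw [List.getD_eq_getElem?_getD, List.getElem?_eq_getElem hjl] at hc
    rw [List.getElem?_eq_getElem hjl]
    simp_all

theorem pv_pair_prefix_drop (cs : List Char) (t : Nat) :
    ['*', '/'] <+: cs.drop t ↔ cs[t]? = some '*' ∧ cs[t + 1]? = some '/' := by
  rw [pv_pair_prefix, List.head?_drop, List.tail_drop, List.head?_drop]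

theorem pv_find_bc_neg (cs : List Char) (i : Nat) (h2 : i + 2 ≤ cs.length)
    (h : PySem.Chars.findFrom cs ['*', '/'] ((i : Int) + 2) none = -1) :
    ∀ m, i + 2 ≤ m → ¬ pvPairStar cs m := by
  have hcast : ((i : Int) + 2) = ((i + 2 : Nat) : Int) := by push_cast; ring
  rw [hcast, PySem.Chars.findFrom_natCast_eq_neg_one_iff cs ['*', '/'] (i + 2) h2] at h
  rintro m hm ⟨hl, h1, h3⟩
  apply h
  have hpfx : ['*', '/'] <+: cs.drop m := by
    rw [pv_pair_prefix_drop]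
    constructor
    · rw [List.getElem?_eq_getElem (by omega)]
      rw [List.getD_eq_getElem?_getD, List.getElem?_eq_getElem (by omega : m < cs.length)] at h1
      simp_all
    · rw [List.getElem?_eq_getElem hl]
      rw [List.getD_eq_getElem?_getD, List.getElem?_eq_getElem hl] at h3
      simp_all
  have hdrop : cs.drop m = (cs.drop (i + 2)).drop (m - (i + 2)) := by
    rw [List.drop_drop, show i + 2 + (m - (i + 2)) = m from by omega]
  rw [hdrop] at hpfx
  exact hpfx.isInfix.trans (List.drop_suffix _ _).isInfix

theorem pv_find_bc_pos (cs : List Char) (i : Nat) (h2 : i + 2 ≤ cs.length)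
    (hne : PySem.Chars.findFrom cs ['*', '/'] ((i : Int) + 2) none ≠ -1) :
    i + 2 ≤ (PySem.Chars.findFrom cs ['*', '/'] ((i : Int) + 2) none).toNat ∧
    pvPairStar cs (PySem.Chars.findFrom cs ['*', '/'] ((i : Int) + 2) none).toNat ∧
    ∀ j, i + 2 ≤ j → j < (PySem.Chars.findFrom cs ['*', '/'] ((i : Int) + 2) none).toNat →
      ¬ pvPairStar cs j := by
  have hcast : ((i : Int) + 2) = ((i + 2 : Nat) : Int) := by push_cast; ring
  rw [hcast] at hne ⊢
  rw [PySem.Chars.findFrom_natCast cs ['*', '/'] (i + 2) h2] at hne ⊢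
  set f := PySem.Chars.find (cs.drop (i + 2)) ['*', '/'] with hf
  have hfne : f ≠ -1 := by intro hc; rw [hc] at hne; simp at hne
  have hf0 : 0 ≤ f := by have := PySem.Chars.neg_one_le_find (cs.drop (i + 2)) ['*', '/']; omega
  rw [if_neg hfne]
  have hspec := PySem.Chars.find_spec hf0
  obtain ⟨hpre, hmin⟩ := hspec
  rw [show List.drop f.toNat (List.drop (i + 2) cs) = cs.drop (i + 2 + f.toNat) from by
        rw [List.drop_drop], pv_pair_prefix_drop] at hpre
  have htn : (((i + 2 : Nat) : Int) + f).toNat = i + 2 + f.toNat := by omega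
  rw [htn]
  obtain ⟨hstar, hslash⟩ := hpre
  have hlen1 : i + 2 + f.toNat + 1 < cs.length := (List.getElem?_eq_some_iff.mp hslash).1
  refine ⟨by omega, ⟨hlen1, ?_, ?_⟩, ?_⟩
  · rw [List.getD_eq_getElem?_getD, hstar]; rfl
  · rw [List.getD_eq_getElem?_getD, hslash]; rfl
  · rintro j hj hjlt ⟨hl, h1, h3⟩
    apply hmin (j - (i + 2)) (by omega)
    have hdrop : List.drop (j - (i + 2)) (List.drop (i + 2) cs) = cs.drop j := by
      rw [List.drop_drop, show i + 2 + (j - (i + 2)) = j from by omega]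
    rw [hdrop, pv_pair_prefix_drop]
    constructor
    · rw [List.getElem?_eq_getElem (by omega : j < cs.length)]
      rw [List.getD_eq_getElem?_getD, List.getElem?_eq_getElem (by omega : j < cs.length)] at h1
      simp_all
    · rw [List.getElem?_eq_getElem hl]
      rw [List.getD_eq_getElem?_getD, List.getElem?_eq_getElem hl] at h3
      simp_all


theorem pvB_comment_end (cs : List Char) (limit : Nat) (st : String) (esc : Bool) (k : Nat)
    (hk : ¬ k < limit) (hst : st = "line_comment" ∨ st = "block_comment") :
    pvBLoop cs limit st esc k = "js_raw" := by
  rw [pvBLoop.eq_def]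
  rcases hst with rfl | rfl <;> simp [hk] <;> rfl

theorem pvB_lc_none (cs : List Char) (limit : Nat) (esc : Bool) :
    ∀ n k, limit - k ≤ n → (∀ m, k ≤ m → m < limit → cs.getD m ' ' ≠ '\n') →
      pvBLoop cs limit "line_comment" esc k = "js_raw" := by
  intro n
  induction n with
  | zero =>
    intro k hn _
    exact pvB_comment_end cs limit _ esc k (by omega) (Or.inl rfl)
  | succ n ih =>
    intro k hn hno
    by_cases hk : k < limit
    · rw [pvBLoop.eq_def]
      have hch : ¬ cs.getD k ' ' = '\n' := hno k (le_refl _) hk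
      simp only [hk, if_pos, hch, if_neg,
        show ¬("line_comment" = "sq" ∨ "line_comment" = "dq" ∨ "line_comment" = "template") from by decide,
        show ("line_comment" : String) = "raw" ↔ False from by simp,
        iff_false, ite_false, not_false_eq_true]
      exact ih (k + 1) (by omega) (fun m hm hml => hno m (by omega) hml)
    · exact pvB_comment_end cs limit _ esc k hk (Or.inl rfl)

theorem pvB_lc_exit (cs : List Char) (limit : Nat) (esc : Bool) :
    ∀ n k m, m - k ≤ n → k ≤ m → cs.getD m ' ' = '\n' →
      (∀ j, k ≤ j → j < m → cs.getD j ' ' ≠ '\n') →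
      pvBLoop cs limit "line_comment" esc k = pvBLoop cs limit "raw" esc (m + 1) := by
  intro n
  induction n with
  | zero =>
    intro k m hn hkm hnl _
    have hkm' : k = m := by omega
    subst hkm'
    by_cases hk : k < limit
    · rw [pvBLoop.eq_def]
      simp only [hk, if_pos, hnl, if_pos,
        show ¬("line_comment" = "sq" ∨ "line_comment" = "dq" ∨ "line_comment" = "template") from by decide,
        show ("line_comment" : String) = "raw" ↔ False from by simp,
        iff_false, ite_false, ite_true, not_false_eq_true, if_true]
    · rw [pvB_comment_end cs limit _ esc k hk (Or.inl rfl), pvBLoop.eq_def]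
      simp [show ¬ k + 1 < limit from by omega]
      rfl
  | succ n ih =>
    intro k m hn hkm hnl hmin
    by_cases hkm' : k = m
    · subst hkm'
      by_cases hk : k < limit
      · rw [pvBLoop.eq_def]
        simp only [hk, if_pos, hnl, if_pos,
          show ¬("line_comment" = "sq" ∨ "line_comment" = "dq" ∨ "line_comment" = "template") from by decide,
          show ("line_comment" : String) = "raw" ↔ False from by simp,
          iff_false, ite_false, ite_true, not_false_eq_true, if_true]
      · rw [pvB_comment_end cs limit _ esc k hk (Or.inl rfl), pvBLoop.eq_def]
        simp [show ¬ k + 1 < limit from by omega]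
        rfl
    · by_cases hk : k < limit
      · rw [pvBLoop.eq_def]
        have hch : ¬ cs.getD k ' ' = '\n' := hmin k (le_refl _) (by omega)
        simp only [hk, if_pos, hch, if_neg,
          show ¬("line_comment" = "sq" ∨ "line_comment" = "dq" ∨ "line_comment" = "template") from by decide,
          show ("line_comment" : String) = "raw" ↔ False from by simp,
          iff_false, ite_false, not_false_eq_true]
        exact ih (k + 1) m (by omega) (by omega) hnl (fun j hj hjm => hmin j (by omega) hjm)
      · rw [pvB_comment_end cs limit _ esc k hk (Or.inl rfl), pvBLoop.eq_def]
        simp [show ¬ m + 1 < limit from by omega]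
        rfl

theorem pvB_bc_none (cs : List Char) (limit : Nat) (esc : Bool) :
    ∀ n k, limit - k ≤ n → (∀ m, k ≤ m → m < limit → ¬ pvPairStar cs m) →
      pvBLoop cs limit "block_comment" esc k = "js_raw" := by
  intro n
  induction n with
  | zero =>
    intro k hn _
    exact pvB_comment_end cs limit _ esc k (by omega) (Or.inr rfl)
  | succ n ih =>
    intro k hn hno
    by_cases hk : k < limit
    · rw [pvBLoop.eq_def]
      have hch : ¬ (cs.getD k ' ' = '*' ∧ k + 1 < cs.length ∧ cs.getD (k + 1) ' ' = '/') := by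
        intro ⟨h1, h2, h3⟩
        exact hno k (le_refl _) hk ⟨h2, h1, h3⟩
      simp only [hk, if_pos, hch, if_neg,
        show ¬("block_comment" = "sq" ∨ "block_comment" = "dq" ∨ "block_comment" = "template") from by decide,
        show ("block_comment" : String) = "raw" ↔ False from by simp,
        show ("block_comment" : String) = "line_comment" ↔ False from by simp,
        iff_false, ite_false, not_false_eq_true]
      exact ih (k + 1) (by omega) (fun m hm hml => hno m (by omega) hml)
    · exact pvB_comment_end cs limit _ esc k hk (Or.inr rfl)

theorem pvB_bc_exit (cs : List Char) (limit : Nat) (esc : Bool) :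
    ∀ n k m, m - k ≤ n → k ≤ m → pvPairStar cs m →
      (∀ j, k ≤ j → j < m → ¬ pvPairStar cs j) →
      pvBLoop cs limit "block_comment" esc k = pvBLoop cs limit "raw" esc (m + 2) := by
  intro n
  induction n with
  | zero =>
    intro k m hn hkm hp _
    have hkm' : k = m := by omega
    subst hkm'
    by_cases hk : k < limit
    · rw [pvBLoop.eq_def]
      obtain ⟨h2, h1, h3⟩ := hp
      simp only [hk, if_pos, h1, h2, h3, and_true, true_and, and_self,
        show ¬("block_comment" = "sq" ∨ "block_comment" = "dq" ∨ "block_comment" = "template") from by decide,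
        show ("block_comment" : String) = "raw" ↔ False from by simp,
        show ("block_comment" : String) = "line_comment" ↔ False from by simp,
        iff_false, ite_false, ite_true, not_false_eq_true, if_true]
    · rw [pvB_comment_end cs limit _ esc k hk (Or.inr rfl), pvBLoop.eq_def]
      simp [show ¬ k + 2 < limit from by omega]
      rfl
  | succ n ih =>
    intro k m hn hkm hp hmin
    by_cases hkm' : k = m
    · subst hkm'
      by_cases hk : k < limit
      · rw [pvBLoop.eq_def]
        obtain ⟨h2, h1, h3⟩ := hp
        simp only [hk, if_pos, h1, h2, h3, and_true, true_and, and_self,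
          show ¬("block_comment" = "sq" ∨ "block_comment" = "dq" ∨ "block_comment" = "template") from by decide,
          show ("block_comment" : String) = "raw" ↔ False from by simp,
          show ("block_comment" : String) = "line_comment" ↔ False from by simp,
          iff_false, ite_false, ite_true, not_false_eq_true, if_true]
      · rw [pvB_comment_end cs limit _ esc k hk (Or.inr rfl), pvBLoop.eq_def]
        simp [show ¬ k + 2 < limit from by omega]
        rfl
    · by_cases hk : k < limit
      · rw [pvBLoop.eq_def]
        have hch : ¬ (cs.getD k ' ' = '*' ∧ k + 1 < cs.length ∧ cs.getD (k + 1) ' ' = '/') := by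
          intro ⟨h1, h2, h3⟩
          exact hmin k (le_refl _) (by omega) ⟨h2, h1, h3⟩
        simp only [hk, if_pos, hch, if_neg,
          show ¬("block_comment" = "sq" ∨ "block_comment" = "dq" ∨ "block_comment" = "template") from by decide,
          show ("block_comment" : String) = "raw" ↔ False from by simp,
          show ("block_comment" : String) = "line_comment" ↔ False from by simp,
          iff_false, ite_false, not_false_eq_true]
        exact ih (k + 1) m (by omega) (by omega) hp (fun j hj hjm => hmin j (by omega) hjm)
      · rw [pvB_comment_end cs limit _ esc k hk (Or.inr rfl), pvBLoop.eq_def]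
        simp [show ¬ m + 2 < limit from by omega]
        rfl

theorem pv_nxt_iff (cs : List Char) (i : Nat) (c : Char) :
    cs[i + 1]? = some c ↔ (i + 1 < cs.length ∧ cs.getD (i + 1) ' ' = c) := by
  constructor
  · intro h
    have := List.getElem?_eq_some_iff.mp h
    exact ⟨this.1, by rw [List.getD_eq_getElem?_getD, h]; rfl⟩
  · rintro ⟨hl, hv⟩
    rw [List.getD_eq_getElem?_getD, List.getElem?_eq_getElem hl] at hv
    rw [List.getElem?_eq_getElem hl]
    simp_all

theorem pv_main (cs : List Char) (limit : Nat) (hlim : limit ≤ cs.length) :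
    ∀ n i state escaped, limit - i ≤ n →
      (state = "raw" ∨ state = "sq" ∨ state = "dq" ∨ state = "template") →
      pvALoop cs limit state escaped i = pvBLoop cs limit state escaped i := by
  intro n
  induction n with
  | zero =>
    intro i state esc hn hs
    have hi : ¬ i < limit := by omega
    rw [pvALoop.eq_def, pvBLoop.eq_def]
    rcases hs with rfl | rfl | rfl | rfl <;> simp [hi] <;> rfl
  | succ n ih =>
    intro i state esc hn hs
    by_cases hi : i < limit
    · rcases hs with rfl | rfl | rfl | rfl
      · -- state "raw"
        rw [pvALoop.eq_def, pvBLoop.eq_def]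
        simp only [hi, dif_pos, if_pos,
          show ¬("raw" = "sq" ∨ "raw" = "dq" ∨ "raw" = "template") from by decide,
          ite_false, not_false_eq_true, if_neg,
          show ("raw" : String) = "raw" ↔ True from by simp, iff_true, ite_true]
        by_cases hq1 : cs.getD i ' ' = '\''
        · simp only [hq1, ite_true, if_pos]
          exact ih (i + 1) "sq" esc (by omega) (by simp)
        · simp only [hq1, ite_false, if_neg, not_false_eq_true]
          by_cases hq2 : cs.getD i ' ' = '"'
          · simp only [hq2, ite_true, if_pos]
            exact ih (i + 1) "dq" esc (by omega) (by simp)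
          · simp only [hq2, ite_false, if_neg, not_false_eq_true]
            by_cases hq3 : cs.getD i ' ' = '`'
            · simp only [hq3, ite_true, if_pos]
              exact ih (i + 1) "template" esc (by omega) (by simp)
            · simp only [hq3, ite_false, if_neg, not_false_eq_true]
              by_cases hsl : cs.getD i ' ' = '/'
              · by_cases hn1 : cs[i + 1]? = some '/'
                · -- line comment
                  have hb1 := (pv_nxt_iff cs i '/').mp hn1
                  have h2 : i + 2 ≤ cs.length := by omega
                  rw [dif_pos ⟨hsl, hn1⟩,
                    if_pos (show cs.getD i ' ' = '/' ∧ i + 1 < cs.length ∧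
                      cs.getD (i + 1) ' ' = '/' from ⟨hsl, hb1.1, hb1.2⟩)]
                  by_cases hle : PySem.Chars.findFrom cs ['\n'] ((i : Int) + 2) none = -1
                  · rw [if_pos hle]
                    rw [pvALoop.eq_def]
                    simp only [show ¬ cs.length < limit from by omega, dite_false, dif_neg,
                      not_false_eq_true]
                    rw [pvB_lc_none cs limit esc limit (i + 2) (by omega)
                      (fun m hm hml => pv_find_nl_neg cs i h2 hle m hm)]
                    rfl
                  · rw [if_neg hle]
                    obtain ⟨hm1, hm2, hm3, hm4⟩ := pv_find_nl_pos cs i h2 hle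
                    set le := PySem.Chars.findFrom cs ['\n'] ((i : Int) + 2) none with hledef
                    have hle0 : 0 ≤ le := by omega
                    rw [show (le + 1).toNat = le.toNat + 1 from by omega]
                    rw [pvB_lc_exit cs limit esc le.toNat (i + 2) le.toNat (by omega) hm1 hm3
                      (fun j hj hjm => hm4 j hj hjm)]
                    exact ih (le.toNat + 1) "raw" esc (by omega) (by simp)
                · by_cases hn2 : cs[i + 1]? = some '*'
                  · -- block comment
                    have hb2 := (pv_nxt_iff cs i '*').mp hn2
                    have h2 : i + 2 ≤ cs.length := by omega
                    have hbno1 : ¬ (cs.getD i ' ' = '/' ∧ i + 1 < cs.length ∧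
                        cs.getD (i + 1) ' ' = '/') :=
                      fun h => hn1 ((pv_nxt_iff cs i '/').mpr h.2)
                    rw [dif_neg (fun h => hn1 h.2), dif_pos ⟨hsl, hn2⟩, if_neg hbno1,
                      if_pos (show cs.getD i ' ' = '/' ∧ i + 1 < cs.length ∧
                        cs.getD (i + 1) ' ' = '*' from ⟨hsl, hb2.1, hb2.2⟩)]
                    by_cases hbe : PySem.Chars.findFrom cs ['*', '/'] ((i : Int) + 2) none = -1
                    · rw [if_pos hbe]
                      rw [pvALoop.eq_def]
                      simp only [show ¬ cs.length < limit from by omega, dite_false, dif_neg,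
                        not_false_eq_true]
                      rw [pvB_bc_none cs limit esc limit (i + 2) (by omega)
                        (fun m hm hml => pv_find_bc_neg cs i h2 hbe m hm)]
                      rfl
                    · rw [if_neg hbe]
                      obtain ⟨hm1, hm2, hm4⟩ := pv_find_bc_pos cs i h2 hbe
                      set be := PySem.Chars.findFrom cs ['*', '/'] ((i : Int) + 2) none with hbedef
                      have hbe0 : 0 ≤ be := by omega
                      rw [show (be + 2).toNat = be.toNat + 2 from by omega]
                      rw [pvB_bc_exit cs limit esc be.toNat (i + 2) be.toNat (by omega) hm1 hm2
                        (fun j hj hjm => hm4 j hj hjm)]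
                      exact ih (be.toNat + 2) "raw" esc (by omega) (by simp)
                  · -- '/' not starting a comment
                    have hbno1 : ¬ (cs.getD i ' ' = '/' ∧ i + 1 < cs.length ∧
                        cs.getD (i + 1) ' ' = '/') :=
                      fun h => hn1 ((pv_nxt_iff cs i '/').mpr h.2)
                    have hbno2 : ¬ (cs.getD i ' ' = '/' ∧ i + 1 < cs.length ∧
                        cs.getD (i + 1) ' ' = '*') :=
                      fun h => hn2 ((pv_nxt_iff cs i '*').mpr h.2)
                    rw [dif_neg (fun h => hn1 h.2), dif_neg (fun h => hn2 h.2),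
                      if_neg hbno1, if_neg hbno2]
                    exact ih (i + 1) "raw" esc (by omega) (by simp)
              · -- plain character
                have hbno1 : ¬ (cs.getD i ' ' = '/' ∧ i + 1 < cs.length ∧
                    cs.getD (i + 1) ' ' = '/') := fun h => hsl h.1
                have hbno2 : ¬ (cs.getD i ' ' = '/' ∧ i + 1 < cs.length ∧
                    cs.getD (i + 1) ' ' = '*') := fun h => hsl h.1
                rw [dif_neg (fun h => hsl h.1), dif_neg (fun h => hsl h.1),
                  if_neg hbno1, if_neg hbno2]
                exact ih (i + 1) "raw" esc (by omega) (by simp)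
      · -- state "sq"
        rw [pvALoop.eq_def, pvBLoop.eq_def]
        cases esc with
        | true =>
          simp only [dif_pos hi, if_pos hi]
          simp
          exact ih (i + 1) "sq" false (by omega) (by simp)
        | false =>
          by_cases hcl : cs.getD i ' ' = '\''
          all_goals by_cases hbs : cs.getD i ' ' = '\\'
          all_goals have hcl' := hcl; have hbs' := hbs
          all_goals rw [List.getD_eq_getElem?_getD] at hcl' hbs'
          · simp [hi, hbs, hbs']
            exact ih (i + 1) "sq" true (by omega) (by simp)
          · simp [hi, hbs, hbs', hcl, hcl']
            exact ih (i + 1) "raw" false (by omega) (by simp)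
          · simp [hi, hbs, hbs']
            exact ih (i + 1) "sq" true (by omega) (by simp)
          · simp [hi, hbs, hbs', hcl, hcl']
            exact ih (i + 1) "sq" false (by omega) (by simp)
      · -- state "dq"
        rw [pvALoop.eq_def, pvBLoop.eq_def]
        cases esc with
        | true =>
          simp only [dif_pos hi, if_pos hi]
          simp
          exact ih (i + 1) "dq" false (by omega) (by simp)
        | false =>
          by_cases hcl : cs.getD i ' ' = '"'
          all_goals by_cases hbs : cs.getD i ' ' = '\\'
          all_goals have hcl' := hcl; have hbs' := hbs
          all_goals rw [List.getD_eq_getElem?_getD] at hcl' hbs'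
          · simp [hi, hbs, hbs']
            exact ih (i + 1) "dq" true (by omega) (by simp)
          · simp [hi, hbs, hbs', hcl, hcl']
            exact ih (i + 1) "raw" false (by omega) (by simp)
          · simp [hi, hbs, hbs']
            exact ih (i + 1) "dq" true (by omega) (by simp)
          · simp [hi, hbs, hbs', hcl, hcl']
            exact ih (i + 1) "dq" false (by omega) (by simp)
      · -- state "template"
        rw [pvALoop.eq_def, pvBLoop.eq_def]
        cases esc with
        | true =>
          simp only [dif_pos hi, if_pos hi]
          simp
          exact ih (i + 1) "template" false (by omega) (by simp)
        | false =>
          by_cases hcl : cs.getD i ' ' = '`'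
          all_goals by_cases hbs : cs.getD i ' ' = '\\'
          all_goals have hcl' := hcl; have hbs' := hbs
          all_goals rw [List.getD_eq_getElem?_getD] at hcl' hbs'
          · simp [hi, hbs, hbs']
            exact ih (i + 1) "template" true (by omega) (by simp)
          · simp [hi, hbs, hbs', hcl, hcl']
            exact ih (i + 1) "raw" false (by omega) (by simp)
          · simp [hi, hbs, hbs']
            exact ih (i + 1) "template" true (by omega) (by simp)
          · simp [hi, hbs, hbs', hcl, hcl']
            exact ih (i + 1) "template" false (by omega) (by simp)
    · rw [pvALoop.eq_def, pvBLoop.eq_def]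
      rcases hs with rfl | rfl | rfl | rfl <;> simp [hi] <;> rfl

-- ===== VERDICT (by name: the statement is the Claim_ definition above) =====
theorem determine_js_context_py_spec : Claim_equal_determine_js_context_py := by
  intro js pos _
  unfold Spec_determine_js_context_py determine_js_context_py determine_js_context_py_alt
  exact pv_main js.toList _ (by omega) _ 0 "raw" false (le_refl _) (Or.inl rfl)
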